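-- pv_equiv track=rewrite | github.com/Byeonjinha/codingTest | 백준/Bronze/2775. 부녀회장이 될테야/부녀회장이 될테야.py | buildApartment
-- ===== SOURCE A (Python) =====
-- def buildApartment(k, n):
--     apartment = [[i for i in range(n + 1)] for _ in range(k + 1)]
--     for floor_idx in range(len(apartment)):
--         if floor_idx == 0: continue
--         for room_idx in range(len(apartment[floor_idx])):
--             if room_idx == 0: continue
--             apartment[floor_idx][room_idx] = apartment[floor_idx - 1][room_idx] + apartment[floor_idx][room_idx - 1]
--     return apartment
-- ===== SOURCE B (Python) =====
-- import math
--
-- def buildApartment(k, n):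
--     return [[math.comb(f + r, f + 1) for r in range(n + 1)] for f in range(k + 1)]
-- ===== Notes on version B (the rewrite author's own statement) =====
-- stated objective: simpler
-- what changed: Replaces the in-place up+left DP recurrence over the table by filling each cell directly with the closed form math.comb(floor+room, floor+1); no cell depends on any other, so the mutation loops disappear.
import Mathlib
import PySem

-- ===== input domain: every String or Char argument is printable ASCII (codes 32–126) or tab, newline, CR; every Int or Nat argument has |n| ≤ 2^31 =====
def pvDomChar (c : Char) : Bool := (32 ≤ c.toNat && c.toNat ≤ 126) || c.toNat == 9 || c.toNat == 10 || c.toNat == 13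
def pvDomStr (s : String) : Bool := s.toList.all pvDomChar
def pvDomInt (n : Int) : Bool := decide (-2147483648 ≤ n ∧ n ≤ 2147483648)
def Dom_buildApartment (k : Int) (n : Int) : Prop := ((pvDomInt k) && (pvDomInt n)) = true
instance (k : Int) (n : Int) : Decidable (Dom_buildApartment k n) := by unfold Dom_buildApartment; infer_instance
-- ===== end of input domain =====

-- B replaces A's in-place up+left DP recurrence by the closed form comb(f+r, f+1) per cell (simpler, order-independent).

-- ===== PORT A =====
-- all indices this program uses are nonnegative and in range, so the getD/setD defaults are never hit (exact there)
def pvRow (t : List (List Int)) (i : Int) : List Int := PySem.List.pyGetD t i []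
def pvCell (t : List (List Int)) (f r : Int) : Int := PySem.List.pyGetD (pvRow t f) r 0
def pvSet (t : List (List Int)) (f r : Int) (v : Int) : List (List Int) :=
  PySem.List.pySetD t f (PySem.List.pySetD (pvRow t f) r v)

def pvInner (floor_idx : Int) (t2 : List (List Int)) (room_idx : Int) : List (List Int) :=
  if room_idx = 0 then t2
  else pvSet t2 floor_idx room_idx
    (pvCell t2 (floor_idx - 1) room_idx + pvCell t2 floor_idx (room_idx - 1))

def pvOuter (t : List (List Int)) (floor_idx : Int) : List (List Int) :=
  if floor_idx = 0 then t
  else (PySem.List.pyRange 0 ((pvRow t floor_idx).length : Int) 1).foldl (pvInner floor_idx) t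

def buildApartment (k : Int) (n : Int) : List (List Int) :=
  let apartment := (PySem.List.pyRange 0 (k + 1) 1).map (fun _ => PySem.List.pyRange 0 (n + 1) 1)
  (PySem.List.pyRange 0 (apartment.length : Int) 1).foldl pvOuter apartment

-- ===== PORT B =====
def buildApartment_alt (k : Int) (n : Int) : List (List Int) :=
  (PySem.List.pyRange 0 (k + 1) 1).map (fun f =>
    (PySem.List.pyRange 0 (n + 1) 1).map (fun r => ((f + r).toNat.choose (f + 1).toNat : Int)))

-- ===== PRECONDITION & SPEC =====
def Spec_buildApartment (k : Int) (n : Int) (out : List (List Int)) : Prop := out = buildApartment_alt k n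
instance (k : Int) (n : Int) (out : List (List Int)) : Decidable (Spec_buildApartment k n out) := by unfold Spec_buildApartment; infer_instance

-- ===== CLAIM (what is proved, stated in full; the proofs are below) =====
def Claim_equal_buildApartment : Prop := ∀ (k : Int) (n : Int), Dom_buildApartment k n → Spec_buildApartment k n (buildApartment k n)

-- ===== LEMMAS AND PROOFS =====

-- closed-form cell value
def pvC (f r : Nat) : Int := ((f + r).choose (f + 1) : Int)
-- row f with cells < j already rewritten to the closed form, the rest still initial
def pvRowF (N f j : Nat) : List Int := (List.range N).map (fun i => if i < j then pvC f i else (i : Int))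
-- table while working on floor f, room pointer j
def pvTbl (K N f j : Nat) : List (List Int) :=
  (List.range K).map (fun i => if i < f then pvRowF N i N else if i = f then pvRowF N f j else pvRowF N 0 0)

theorem pvC_zero_left (i : Nat) : pvC 0 i = (i : Int) := by
  simp [pvC, Nat.choose_one_right]

theorem pvC_zero_right (f : Nat) : pvC f 0 = 0 := by
  simp [pvC]

theorem map_range_congr {α : Type} (g g' : Nat → α) (N : Nat)
    (h : ∀ i, i < N → g i = g' i) : (List.range N).map g = (List.range N).map g' :=
  List.map_congr_left (fun i hi => h i (List.mem_range.mp hi))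

theorem pyR0 (m : Int) : PySem.List.pyRange 0 m 1 = (List.range m.toNat).map (fun r : Nat => (r : Int)) := by
  rw [PySem.List.pyRange_one]
  simp only [Int.sub_zero]
  exact map_range_congr _ _ _ (fun i _ => by simp)

theorem set_map_range {α : Type} (g g' : Nat → α) (N j : Nat) (v : α)
    (hj : j < N) (hv : g' j = v) (hg : ∀ i, i ≠ j → g i = g' i) :
    ((List.range N).map g).set j v = (List.range N).map g' := by
  apply List.ext_getElem
  · simp
  · intro i hi hi'
    simp only [List.length_map, List.length_range] at hi
    rw [List.getElem_set]
    by_cases h : j = i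
    · subst h; simp [hv]
    · simp [h, hg i (fun he => h he.symm)]

theorem pvRowF_zero (N f g : Nat) : pvRowF N f 0 = pvRowF N g 0 := by
  simp [pvRowF]

theorem pvRowF_zero_floor (N j : Nat) : pvRowF N 0 j = pvRowF N 0 0 := by
  unfold pvRowF
  apply map_range_congr
  intro i _
  by_cases h : i < j <;> simp [h, pvC_zero_left]

theorem pvRowF_one (N f : Nat) : pvRowF N f 1 = pvRowF N f 0 := by
  unfold pvRowF
  apply map_range_congr
  intro i _
  by_cases h : i < 1
  · interval_cases i; simp [pvC_zero_right]
  · simp [h]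

theorem pvRow_tbl (K N f j i : Nat) (hi : i < K) :
    pvRow (pvTbl K N f j) (i : Int) =
      (if i < f then pvRowF N i N else if i = f then pvRowF N f j else pvRowF N 0 0) := by
  unfold pvRow pvTbl
  rw [PySem.List.pyGetD_natCast]
  rw [List.getD_eq_getElem _ _ (by simpa using hi)]
  simp

theorem pvRowF_get (N f j r : Nat) (hr : r < N) :
    PySem.List.pyGetD (pvRowF N f j) (r : Int) 0 = (if r < j then pvC f r else (r : Int)) := by
  unfold pvRowF
  rw [PySem.List.pyGetD_natCast]
  rw [List.getD_eq_getElem _ _ (by simpa using hr)]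
  simp

theorem pvRowF_length (N f j : Nat) : (pvRowF N f j).length = N := by
  simp [pvRowF]

theorem pvTbl_step_zero (K N f : Nat) (hf : 1 ≤ f) (hfK : f < K) :
    pvInner (f : Int) (pvTbl K N f 0) 0 = pvTbl K N f 1 := by
  have h : pvTbl K N f 1 = pvTbl K N f 0 := by unfold pvTbl; rw [pvRowF_one]
  unfold pvInner
  simp [h]

theorem pvC_pascal (f j : Nat) (hf : 1 ≤ f) (hj : 1 ≤ j) :
    pvC (f - 1) j + pvC f (j - 1) = pvC f j := by
  obtain ⟨g, rfl⟩ : ∃ g, f = g + 1 := ⟨f - 1, by omega⟩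
  obtain ⟨i, rfl⟩ : ∃ i, j = i + 1 := ⟨j - 1, by omega⟩
  unfold pvC
  have : (g + 1 + (i + 1)).choose (g + 1 + 1) =
      (g + 1 - 1 + (i + 1)).choose (g + 1 - 1 + 1) + (g + 1 + (i + 1 - 1)).choose (g + 1 + 1) := by
    simp only [Nat.add_sub_cancel]
    rw [show g + 1 + (i + 1) = (g + i + 1) + 1 by omega, show g + 1 + 1 = (g + 1) + 1 from rfl,
      Nat.choose_succ_succ, show g + (i + 1) = g + i + 1 by omega, show g + 1 + i = g + i + 1 by omega]
  rw [this]
  push_cast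
  ring

theorem pvInner_step (K N f j : Nat) (hf : 1 ≤ f) (hfK : f < K) (hj1 : 1 ≤ j) (hjN : j < N) :
    pvInner (f : Int) (pvTbl K N f j) (j : Int) = pvTbl K N f (j + 1) := by
  unfold pvInner
  rw [if_neg (by exact_mod_cast (by omega : j ≠ 0))]
  have hfc : (f : Int) - 1 = ((f - 1 : Nat) : Int) := by omega
  have hjc : (j : Int) - 1 = ((j - 1 : Nat) : Int) := by omega
  have hc1 : pvCell (pvTbl K N f j) ((f : Int) - 1) (j : Int) = pvC (f - 1) j := by
    unfold pvCell
    rw [hfc, pvRow_tbl K N f j (f - 1) (by omega), if_pos (by omega),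
      pvRowF_get N (f - 1) N j hjN, if_pos hjN]
  have hc2 : pvCell (pvTbl K N f j) (f : Int) ((j : Int) - 1) = pvC f (j - 1) := by
    unfold pvCell
    rw [hjc, pvRow_tbl K N f j f hfK, if_neg (by omega), if_pos rfl,
      pvRowF_get N f j (j - 1) (by omega), if_pos (by omega)]
  rw [hc1, hc2, pvC_pascal f j hf hj1]
  unfold pvSet
  rw [pvRow_tbl K N f j f hfK, if_neg (by omega), if_pos rfl]
  simp only [PySem.List.pySetD_natCast]
  have hrow : (pvRowF N f j).set j (pvC f j) = pvRowF N f (j + 1) := by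
    unfold pvRowF
    apply set_map_range _ _ _ _ _ hjN
    · simp [show j < j + 1 by omega]
    · intro i hij
      by_cases h : i < j
      · simp [h, show i < j + 1 by omega]
      · simp [h, show ¬ i < j + 1 by omega]
  rw [hrow]
  unfold pvTbl
  apply set_map_range _ _ _ _ _ hfK
  · simp [show ¬ f < f by omega]
  · intro i hif
    by_cases h : i < f
    · simp [h]
    · simp [h, hif]

theorem pvInner_fold (K N f j : Nat) (hf : 1 ≤ f) (hfK : f < K) (hjN : j ≤ N) :
    ((List.range j).map (fun r : Nat => (r : Int))).foldl (pvInner (f : Int)) (pvTbl K N f 0) =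
      pvTbl K N f j := by
  induction j with
  | zero => simp
  | succ j ih =>
    rw [List.range_succ, List.map_append, List.foldl_append]
    rw [ih (by omega)]
    by_cases h0 : j = 0
    · subst h0
      simpa using pvTbl_step_zero K N f hf hfK
    · simpa using pvInner_step K N f j hf hfK (by omega) (by omega)

theorem pvTbl_done (K N f : Nat) (hfK : f < K) : pvTbl K N f N = pvTbl K N (f + 1) 0 := by
  unfold pvTbl
  apply map_range_congr
  intro i _
  by_cases h1 : i < f
  · simp [h1, show i < f + 1 by omega]
  · by_cases h2 : i = f
    · subst h2; simp [show i < i + 1 by omega]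
    · have h3 : ¬ i < f + 1 := by omega
      have h4 : i ≠ f + 1 ∨ i = f + 1 := by omega
      by_cases h5 : i = f + 1
      · simp [h1, h2, h5, show ¬ (f+1) < f+1 by omega, pvRowF_zero N (f+1) 0]
      · simp [h1, h2, h3, h5]

theorem pvOuter_step (K N f : Nat) (hfK : f < K) :
    pvOuter (pvTbl K N f 0) (f : Int) = pvTbl K N (f + 1) 0 := by
  unfold pvOuter
  by_cases h0 : f = 0
  · subst h0
    simp only [Nat.cast_zero, if_pos rfl]
    unfold pvTbl
    apply map_range_congr
    intro i _
    by_cases h : i = 0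
    · subst h; simp [pvRowF_zero_floor]
    · by_cases h1 : i = 1
      · subst h1; simp [pvRowF_zero N 1 0]
      · simp [h, h1, show ¬ i < 0 by omega, show ¬ i < 1 by omega]
  · have hf : 1 ≤ f := by omega
    rw [if_neg (by exact_mod_cast h0)]
    rw [pvRow_tbl K N f 0 f hfK, if_neg (by omega), if_pos rfl, pvRowF_length]
    rw [pyR0]
    simp only [Int.toNat_natCast]
    rw [pvInner_fold K N f N hf hfK (le_refl N)]
    exact pvTbl_done K N f hfK

theorem pvOuter_fold (K N f : Nat) (hfK : f ≤ K) :
    ((List.range f).map (fun r : Nat => (r : Int))).foldl pvOuter (pvTbl K N 0 0) = pvTbl K N f 0 := by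
  induction f with
  | zero => simp
  | succ f ih =>
    rw [List.range_succ, List.map_append, List.foldl_append, ih (by omega)]
    simpa using pvOuter_step K N f (by omega)

theorem pvInit (k n : Int) :
    (PySem.List.pyRange 0 (k + 1) 1).map (fun _ => PySem.List.pyRange 0 (n + 1) 1) =
      pvTbl (k + 1).toNat (n + 1).toNat 0 0 := by
  rw [pyR0, pyR0, List.map_map]
  unfold pvTbl
  apply map_range_congr
  intro i _
  by_cases h : i = 0
  · subst h; simp [pvRowF]
  · simp [h, show ¬ i < 0 by omega, pvRowF]

theorem pvFinal (k n : Int) : pvTbl (k + 1).toNat (n + 1).toNat (k + 1).toNat 0 = buildApartment_alt k n := by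
  unfold buildApartment_alt
  rw [pyR0, pyR0, List.map_map]
  unfold pvTbl
  apply map_range_congr
  intro i hi
  simp only [Function.comp, hi, if_pos]
  rw [List.map_map]
  unfold pvRowF
  apply map_range_congr
  intro r hr
  simp only [Function.comp, hr, if_pos]
  unfold pvC
  congr 1 <;> omega

-- ===== VERDICT (by name: the statement is the Claim_ definition above) =====
theorem buildApartment_spec : Claim_equal_buildApartment := by
  intro k n _
  unfold Spec_buildApartment buildApartment
  simp only []
  rw [pvInit k n]
  have hlen : (pvTbl (k + 1).toNat (n + 1).toNat 0 0).length = (k + 1).toNat := by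
    simp [pvTbl]
  rw [hlen, pyR0]
  simp only [Int.toNat_natCast]
  rw [pvOuter_fold _ _ _ (le_refl _)]
  exact pvFinal k n
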